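-- pv_equiv track=rewrite | github.com/anonosuke/atcoder | ABC/ABC360/F.py | max_intersecting_segment
-- ===== SOURCE A (Python) =====
-- def max_intersecting_segment(n, segments):
--     events = []
--     for l, r in segments:
--         events.append((l, 1))
--         events.append((r + 1, -1))
--
--     events.sort()
--
--     max_intersect = 0
--     current_intersect = 0
--     best_l = 0
--     best_r = 0
--
--     for i in range(len(events) - 1):
--         current_intersect += events[i][1]
--         if current_intersect > max_intersect:
--             max_intersect = current_intersect
--             best_l = events[i][0]
--             best_r = events[i + 1][0] - 1
--
--     return best_l, best_r
-- ===== SOURCE B (Python) =====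
-- def max_intersecting_segment(n, segments):
--     pts = sorted({l for l, _ in segments} | {r + 1 for _, r in segments})
--
--     def cov(c):
--         return sum(1 for l, _ in segments if l <= c) - sum(1 for _, r in segments if r < c)
--
--     best, best_l, best_r = 0, 0, 0
--     for j in range(len(pts) - 1):
--         k = cov(pts[j])
--         if k > best:
--             best, best_l, best_r = k, pts[j], pts[j + 1] - 1
--     return best_l, best_r
-- ===== Notes on version B (the rewrite author's own statement) =====
-- stated objective: alternative
-- what changed: B drops A's 2n-event list and running sweep counter entirely: it sorts only the distinct boundary coordinates and, for each candidate point, counts the stabbing segments by a direct scan of the segment list (started-before minus ended-before), picking the first point whose count strictly beats the best.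
import Mathlib
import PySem

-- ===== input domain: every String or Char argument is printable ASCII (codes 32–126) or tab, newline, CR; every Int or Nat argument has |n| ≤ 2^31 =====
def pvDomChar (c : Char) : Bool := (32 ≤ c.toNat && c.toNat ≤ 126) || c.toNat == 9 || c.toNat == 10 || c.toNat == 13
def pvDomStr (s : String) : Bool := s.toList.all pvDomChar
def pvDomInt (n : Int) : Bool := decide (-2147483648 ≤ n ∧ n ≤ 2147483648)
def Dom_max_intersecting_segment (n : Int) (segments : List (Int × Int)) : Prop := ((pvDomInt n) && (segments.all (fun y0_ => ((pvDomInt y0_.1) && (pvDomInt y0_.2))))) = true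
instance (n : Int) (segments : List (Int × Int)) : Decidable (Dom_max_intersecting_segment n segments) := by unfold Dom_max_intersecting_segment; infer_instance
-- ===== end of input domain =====

-- B drops A's 2n-event list and running sweep counter: it sorts only the distinct boundary
-- coordinates and counts, for each candidate point, the stabbing segments by a direct scan of
-- the segment list (objective: alternative; B is O(n^2) where A is O(n log n)).

-- ===== PORT A =====
def max_intersecting_segment (n : Int) (segments : List (Int × Int)) : Int × Int :=
  let events : List (Int × Int) :=
    segments.foldl (fun acc p => acc ++ [(p.1, (1 : Int))] ++ [(p.2 + 1, (-1 : Int))]) []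
  let sevents := PySem.List.sorted2 events (fun e => e.1) (fun e => e.2) false
  let st :=
    (PySem.List.pyRange 0 ((sevents.length : Int) - 1) 1).foldl
      (fun (st : Int × Int × Int × Int) i =>
        let cur := st.2.1 + (PySem.List.pyGetD sevents i ((0:Int),(0:Int))).2
        if cur > st.1 then
          (cur, cur, (PySem.List.pyGetD sevents i ((0:Int),(0:Int))).1,
           (PySem.List.pyGetD sevents (i+1) ((0:Int),(0:Int))).1 - 1)
        else (st.1, cur, st.2.2.1, st.2.2.2))
      ((0:Int), (0:Int), (0:Int), (0:Int))
  (st.2.2.1, st.2.2.2)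

-- ===== PORT B =====
def max_intersecting_segment_alt (n : Int) (segments : List (Int × Int)) : Int × Int :=
  let pts := PySem.List.sorted
    (PySem.Set.union (PySem.Set.ofList (segments.map (fun p => p.1)))
      (segments.map (fun p => p.2 + 1))) (fun c => c) false
  let cov := fun (c : Int) =>
    ((segments.countP (fun p => decide (p.1 ≤ c)) : Int))
      - ((segments.countP (fun p => decide (p.2 < c)) : Int))
  let st :=
    (PySem.List.pyRange 0 ((pts.length : Int) - 1) 1).foldl
      (fun (st : Int × Int × Int) j =>
        let k := cov (PySem.List.pyGetD pts j 0)
        if k > st.1 then (k, PySem.List.pyGetD pts j 0, PySem.List.pyGetD pts (j+1) 0 - 1)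
        else st)
      ((0:Int), (0:Int), (0:Int))
  (st.2.1, st.2.2)

-- ===== PRECONDITION & SPEC =====
def Spec_max_intersecting_segment (n : Int) (segments : List (Int × Int)) (out : Int × Int) : Prop := out = max_intersecting_segment_alt n segments
instance (n : Int) (segments : List (Int × Int)) (out : Int × Int) : Decidable (Spec_max_intersecting_segment n segments out) := by unfold Spec_max_intersecting_segment; infer_instance

-- ===== CLAIM (what is proved, stated in full; the proofs are below) =====
def Claim_equal_max_intersecting_segment : Prop := ∀ (n : Int) (segments : List (Int × Int)), Dom_max_intersecting_segment n segments → Spec_max_intersecting_segment n segments (max_intersecting_segment n segments)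


-- ===== LEMMAS AND PROOFS =====

-- the flat event list (l,+1),(r+1,-1) in segment order
def pvEv (segments : List (Int × Int)) : List (Int × Int) :=
  segments.flatMap (fun p => [(p.1, (1:Int)), (p.2 + 1, (-1:Int))])

-- net delta at a coordinate
def pvDelta (L : List (Int × Int)) (c : Int) : Int :=
  ((L.filter (fun e => e.1 == c)).map (fun e => e.2)).sum

-- prefix sum of deltas: total weight of events at coordinates ≤ c
def pvS (L : List (Int × Int)) (c : Int) : Int :=
  ((L.filter (fun e => decide (e.1 ≤ c))).map (fun e => e.2)).sum

-- the block of sorted events at one coordinate: all (c,-1) then all (c,1)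
def pvGrp (L : List (Int × Int)) (c : Int) : List (Int × Int) :=
  List.replicate (L.count (c, -1)) (c, (-1:Int)) ++ List.replicate (L.count (c, 1)) (c, (1:Int))

-- A's per-event step (lookahead = next event)
def pvGA (st : Int × Int × Int × Int) (e e' : Int × Int) : Int × Int × Int × Int :=
  let cur := st.2.1 + e.2
  if cur > st.1 then (cur, cur, e.1, e'.1 - 1) else (st.1, cur, st.2.2.1, st.2.2.2)

-- the intermediate per-coordinate step with a running counter (lookahead = next coordinate)
def pvGB (dl : Int → Int) (st : Int × Int × Int × Int) (c c' : Int) : Int × Int × Int × Int :=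
  let cur := st.2.1 + dl c
  if cur > st.1 then (cur, cur, c, c' - 1) else (st.1, cur, st.2.2.1, st.2.2.2)

-- B's per-coordinate step: the coverage at c is recomputed from scratch, no running counter
def pvHB (L : List (Int × Int)) (st : Int × Int × Int) (c c' : Int) : Int × Int × Int :=
  if pvS L c > st.1 then (pvS L c, c, c' - 1) else st

-- a fold over adjacent pairs of a list
def pvRun {s a : Type} (g : s -> a -> a -> s) : s -> List a -> s
  | st, [] => st
  | st, [_] => st
  | st, x :: y :: t => pvRun g (g st x y) (y :: t)

theorem pvRun_single {s a : Type} (g : s -> a -> a -> s) (st : s) (x : a) : pvRun g st [x] = st := rfl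

theorem pvRun_cons {s a : Type} (g : s -> a -> a -> s) (st : s) (x y : a) (t : List a) :
    pvRun g st (x :: y :: t) = pvRun g (g st x y) (y :: t) := rfl

theorem pvRun_cons' {s a : Type} (g : s -> a -> a -> s) (st : s) (x : a) (l : List a) (hl : l ≠ []) :
    pvRun g st (x :: l) = pvRun g (g st x (l.head hl)) l := by
  cases l with
  | nil => exact absurd rfl hl
  | cons y t => rfl

theorem pvRun_cons2 {s a : Type} (g : s -> a -> a -> s) (st : s) (x z : a) (l t' : List a)
    (hl : l = z :: t') : pvRun g st (x :: l) = pvRun g (g st x z) l := by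
  subst hl; rfl

theorem pv_foldl_zip_tail {s a : Type} (g : s -> a -> a -> s) (xs : List a) (init : s) :
    (xs.zip xs.tail).foldl (fun st p => g st p.1 p.2) init = pvRun g init xs := by
  induction xs generalizing init with
  | nil => rfl
  | cons x l ih =>
    cases l with
    | nil => rfl
    | cons y t => simpa [pvRun_cons] using ih (init := g init x y)

theorem pv_adj {a s : Type} (xs : List a) (d : a) (g : s -> a -> a -> s) (init : s) :
    (PySem.List.pyRange 0 ((xs.length : Int) - 1) 1).foldl
      (fun st i => g st (PySem.List.pyGetD xs i d) (PySem.List.pyGetD xs (i+1) d)) init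
    = pvRun g init xs := by
  rw [← pv_foldl_zip_tail g xs init, ← List.foldl_map
    (f := fun i : Int => (PySem.List.pyGetD xs i d, PySem.List.pyGetD xs (i+1) d))
    (g := fun st p => g st p.1 p.2)]
  congr 1
  apply List.ext_getElem
  · simp [PySem.List.length_pyRange_one]
  · intro k h1 h2
    have hk : k < xs.length - 1 := by
      simp [PySem.List.length_pyRange_one] at h1; omega
    have hk1 : k < xs.length := by omega
    have hk2 : k + 1 < xs.length := by omega
    simp only [List.getElem_map, PySem.List.getElem_pyRange_one, List.getElem_zip, List.getElem_tail]
    have e0 : (0:Int) + (k:Int) = ((k:Nat):Int) := by push_cast; ring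
    have e1 : ((k:Int)) + 1 = (((k+1):Nat):Int) := by push_cast; ring
    rw [e0, e1, PySem.List.pyGetD_natCast, PySem.List.pyGetD_natCast]
    simp [List.getD_eq_getElem?_getD, List.getElem?_eq_getElem, hk1, hk2]


-- ---- lexicographic order used by Python's tuple sort ----
def pvLexb (x y : Int × Int) : Bool :=
  decide (x.1 < y.1) || (!decide (y.1 < x.1) && decide (x.2 < y.2))

def pvR (x y : Int × Int) : Prop := pvLexb y x = false

theorem pvLexb_iff (x y : Int × Int) : pvLexb x y = true ↔ (x.1 < y.1 ∨ (x.1 = y.1 ∧ x.2 < y.2)) := by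
  obtain ⟨a, b⟩ := x; obtain ⟨c, d⟩ := y
  simp [pvLexb]; omega

theorem pvR_iff (x y : Int × Int) : pvR x y ↔ (x.1 < y.1 ∨ (x.1 = y.1 ∧ x.2 ≤ y.2)) := by
  obtain ⟨a, b⟩ := x; obtain ⟨c, d⟩ := y
  simp [pvR, pvLexb]; omega

theorem pvR_of_lexb (x y : Int × Int) (h : pvLexb x y = true) : pvR x y := by
  rw [pvLexb_iff] at h; rw [pvR_iff]; omega

theorem pvR_trans' (x y z : Int × Int) (h1 : pvLexb x y = true) (h2 : pvR y z) : pvR x z := by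
  rw [pvLexb_iff] at h1; rw [pvR_iff] at h2 ⊢; omega

theorem pvR_antisymm (x y : Int × Int) (h1 : pvR x y) (h2 : pvR y x) : x = y := by
  rw [pvR_iff] at h1 h2
  obtain ⟨a, b⟩ := x; obtain ⟨c, d⟩ := y
  simp only [Prod.mk.injEq]
  simp only at h1 h2
  omega

theorem pv_insertBy_pairwise (x : Int × Int) (l : List (Int × Int)) (h : l.Pairwise pvR) :
    (PySem.List.insertBy pvLexb x l).Pairwise pvR := by
  induction l with
  | nil => simp [PySem.List.insertBy, pvR]
  | cons y t ih =>
    rw [List.pairwise_cons] at h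
    by_cases hb : pvLexb x y = true
    · rw [show PySem.List.insertBy pvLexb x (y :: t) = x :: y :: t from by
        simp [PySem.List.insertBy, hb]]
      refine List.Pairwise.cons ?_ (List.Pairwise.cons h.1 h.2)
      intro z hz
      rcases List.mem_cons.mp hz with rfl | hz
      · exact pvR_of_lexb _ _ hb
      · exact pvR_trans' _ _ _ hb (h.1 z hz)
    · rw [show PySem.List.insertBy pvLexb x (y :: t) = y :: PySem.List.insertBy pvLexb x t from by
        simp [PySem.List.insertBy, hb]]
      refine List.Pairwise.cons ?_ (ih h.2)
      intro z hz
      rcases (PySem.List.mem_insertBy pvLexb x z t).mp hz with rfl | hz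
      · exact (by simpa [pvR] using (Bool.not_eq_true _).mp hb)
      · exact h.1 z hz

theorem pv_foldl_insertBy_pairwise (l : List (Int × Int)) :
    ∀ acc : List (Int × Int), acc.Pairwise pvR →
      (l.foldl (fun acc x => PySem.List.insertBy pvLexb x acc) acc).Pairwise pvR := by
  induction l with
  | nil => intro acc h; simpa using h
  | cons x t ih => intro acc h; exact ih _ (pv_insertBy_pairwise x acc h)

theorem pv_sorted2_eq (xs ys : List (Int × Int)) (hperm : ys.Perm xs) (hpw : ys.Pairwise pvR) :
    PySem.List.sorted2 xs (fun e => e.1) (fun e => e.2) false = ys := by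
  have hunf : PySem.List.sorted2 xs (fun e => e.1) (fun e => e.2) false
      = xs.foldl (fun acc x => PySem.List.insertBy pvLexb x acc) [] := rfl
  have hpw2 : (PySem.List.sorted2 xs (fun e => e.1) (fun e => e.2) false).Pairwise pvR := by
    rw [hunf]; exact pv_foldl_insertBy_pairwise xs [] (by simp)
  refine List.eq_of_perm_of_sorted (fun a b _ _ hab hba => pvR_antisymm a b hab hba) hpw2 hpw ?_
  exact (PySem.List.sorted2_perm xs _ _ false).trans hperm.symm

-- ---- the canonical sorted event list: blocks per coordinate ----
def pvE (L : List (Int × Int)) (cs : List Int) : List (Int × Int) := cs.flatMap (pvGrp L)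

theorem pv_mem_grp {L : List (Int × Int)} {c : Int} {e : Int × Int} (h : e ∈ pvGrp L c) : e.1 = c := by
  simp only [pvGrp, List.mem_append, List.mem_replicate] at h
  rcases h with ⟨-, rfl⟩ | ⟨-, rfl⟩ <;> rfl

theorem pv_count_flatMap (L : List (Int × Int)) (a : Int × Int) : ∀ cs : List Int, cs.Nodup →
    (pvE L cs).count a = if a.1 ∈ cs then (pvGrp L a.1).count a else 0 := by
  intro cs
  induction cs with
  | nil => intro _; simp [pvE]
  | cons c t ih =>
    intro hnd
    rw [List.nodup_cons] at hnd
    have hE : pvE L (c :: t) = pvGrp L c ++ pvE L t := by simp [pvE]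
    rw [hE, List.count_append, ih hnd.2]
    by_cases h : a.1 = c
    · have hnt : a.1 ∉ t := h ▸ hnd.1
      rw [if_neg hnt, if_pos (by rw [h]; exact List.mem_cons_self), h, add_zero]
    · have hz : (pvGrp L c).count a = 0 := by
        rw [List.count_eq_zero]; intro hm; exact h (pv_mem_grp hm)
      by_cases ht : a.1 ∈ t <;> simp [hz, h, ht]

theorem pv_count_grp (L : List (Int × Int)) (c x v : Int) :
    (pvGrp L c).count (x, v)
      = (if (c, (-1:Int)) = (x, v) then L.count (c, -1) else 0)
        + (if (c, (1:Int)) = (x, v) then L.count (c, 1) else 0) := by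
  simp [pvGrp, List.count_append, List.count_replicate]

theorem pv_perm_E (L : List (Int × Int)) (cs : List Int) (hnd : cs.Nodup)
    (hcov : ∀ e ∈ L, e.1 ∈ cs) (hpm : ∀ e ∈ L, e.2 = 1 ∨ e.2 = -1) :
    (pvE L cs).Perm L := by
  rw [List.perm_iff_count]
  intro a
  rw [pv_count_flatMap L a cs hnd]
  obtain ⟨x, v⟩ := a
  by_cases hx : x ∈ cs
  · rw [if_pos hx, pv_count_grp]
    by_cases hv1 : v = 1
    · subst hv1; simp
    · by_cases hv2 : v = -1
      · subst hv2; simp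
      · have hz : L.count (x, v) = 0 := by
          rw [List.count_eq_zero]; intro hm
          rcases hpm _ hm with h | h <;> simp at h <;> omega
        rw [hz, if_neg (by simp [Prod.ext_iff]; omega), if_neg (by simp [Prod.ext_iff]; omega)]
  · rw [if_neg hx]
    symm; rw [List.count_eq_zero]; intro hm
    exact hx (hcov _ hm)

theorem pv_pairwise_grp (L : List (Int × Int)) (c : Int) : (pvGrp L c).Pairwise pvR := by
  rw [pvGrp, List.pairwise_append]
  refine ⟨?_, ?_, ?_⟩
  · rw [List.pairwise_replicate]; right; rw [pvR_iff]; simp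
  · rw [List.pairwise_replicate]; right; rw [pvR_iff]; simp
  · intro a ha b hb
    rw [List.mem_replicate] at ha hb
    rw [ha.2, hb.2, pvR_iff]; simp

theorem pv_pairwise_E (L : List (Int × Int)) : ∀ cs : List Int,
    cs.Pairwise (· < ·) → (pvE L cs).Pairwise pvR := by
  intro cs
  induction cs with
  | nil => intro _; simp [pvE]
  | cons c t ih =>
    intro h
    rw [List.pairwise_cons] at h
    have hE : pvE L (c :: t) = pvGrp L c ++ pvE L t := by simp [pvE]
    rw [hE, List.pairwise_append]
    refine ⟨pv_pairwise_grp L c, ih h.2, ?_⟩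
    intro a ha b hb
    have ha1 := pv_mem_grp ha
    rw [show pvE L t = t.flatMap (pvGrp L) from rfl, List.mem_flatMap] at hb
    obtain ⟨c', hc', hb'⟩ := hb
    have hb1 := pv_mem_grp hb'
    rw [pvR_iff]
    left
    rw [ha1, hb1]
    exact h.1 c' hc'

-- ---- the sweep: A's per-event run equals the per-coordinate counter run ----
theorem pv_stepA_minus (mx cur bl br c : Int) (e' : Int × Int) (h : cur ≤ mx) :
    pvGA (mx, cur, bl, br) (c, -1) e' = (mx, cur - 1, bl, br) := by
  simp only [pvGA]
  rw [if_neg (by simp; omega)]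
  have e0 : cur + ((c, (-1:Int)).2) = cur - 1 := by
    show cur + (-1) = cur - 1
    omega
  rw [e0]

theorem pv_stepA_plus (mx cur bl br c : Int) (e' : Int × Int) :
    pvGA (mx, cur, bl, br) (c, 1) e'
      = if cur + 1 > mx then (cur + 1, cur + 1, c, e'.1 - 1) else (mx, cur + 1, bl, br) := rfl

theorem pv_minusRun (c : Int) : ∀ (m : Nat) (mx cur bl br : Int) (y : Int × Int) (t : List (Int × Int)),
    cur ≤ mx →
    pvRun pvGA (mx, cur, bl, br) (List.replicate m (c, -1) ++ y :: t)
      = pvRun pvGA (mx, cur - (m : Int), bl, br) (y :: t) := by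
  intro m
  induction m with
  | zero => intro mx cur bl br y t h; simp
  | succ m ih =>
    intro mx cur bl br y t h
    rw [List.replicate_succ, List.cons_append,
      pvRun_cons' _ _ _ _ (by simp : List.replicate m (c, (-1:Int)) ++ y :: t ≠ []),
      pv_stepA_minus _ _ _ _ _ _ h, ih _ _ _ _ _ _ (by omega)]
    have e0 : cur - 1 - (m : Int) = cur - ((m + 1 : Nat) : Int) := by push_cast; ring
    rw [e0]

theorem pv_plusRun (c : Int) : ∀ (p : Nat) (mx cur bl br : Int) (y : Int × Int) (t : List (Int × Int)),
    cur ≤ mx →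
    pvRun pvGA (mx, cur, bl, br) (List.replicate p (c, 1) ++ y :: t)
      = pvRun pvGA (if cur + (p : Int) > mx then (cur + p, cur + p, c, y.1 - 1)
                    else (mx, cur + p, bl, br)) (y :: t) := by
  intro p
  induction p with
  | zero =>
    intro mx cur bl br y t h
    rw [if_neg (by push_cast; omega)]
    simp
  | succ p ih =>
    intro mx cur bl br y t h
    rw [List.replicate_succ, List.cons_append]
    cases p with
    | zero =>
      rw [pvRun_cons2 pvGA _ (c, (1:Int)) y _ t (by simp), pv_stepA_plus]
      by_cases hc : cur + 1 > mx
      · rw [if_pos hc, if_pos (by push_cast; omega)]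
        have e1 : cur + ((0 + 1 : Nat) : Int) = cur + 1 := by norm_num
        rw [e1]
        simp
      · rw [if_neg hc, if_neg (by push_cast; omega)]
        have e1 : cur + ((0 + 1 : Nat) : Int) = cur + 1 := by norm_num
        rw [e1]
        simp
    | succ q =>
      rw [pvRun_cons2 pvGA _ (c, (1:Int)) (c, (1:Int)) _
        (List.replicate q (c, (1:Int)) ++ y :: t) (by rw [List.replicate_succ, List.cons_append]),
        pv_stepA_plus]
      by_cases hc : cur + 1 > mx
      · rw [if_pos hc, ih _ _ _ _ _ _ (le_refl _),
          if_pos (by push_cast; omega), if_pos (by push_cast at hc ⊢; omega)]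
        have e2 : cur + 1 + ((q + 1 : Nat) : Int) = cur + ((q + 1 + 1 : Nat) : Int) := by
          push_cast; ring
        rw [e2]
      · rw [if_neg hc, ih _ _ _ _ _ _ (by omega)]
        have e2 : cur + 1 + ((q + 1 : Nat) : Int) = cur + ((q + 1 + 1 : Nat) : Int) := by
          push_cast; ring
        rw [e2]

theorem pv_minusOnly (c : Int) : ∀ (m : Nat) (mx cur bl br : Int), cur ≤ mx →
    (pvRun pvGA (mx, cur, bl, br) (List.replicate m (c, -1))).2.2 = (bl, br) := by
  intro m
  induction m with
  | zero => intros; rfl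
  | succ m ih =>
    intro mx cur bl br h
    cases m with
    | zero => rfl
    | succ q =>
      rw [List.replicate_succ,
        pvRun_cons' _ _ _ _ (by simp : List.replicate (q + 1) (c, (-1:Int)) ≠ []),
        pv_stepA_minus _ _ _ _ _ _ h]
      exact ih _ _ _ _ (by omega)

theorem pv_plusOnly (c : Int) : ∀ (p : Nat) (mx cur bl br : Int), (0:Int) ≤ mx → cur + (p : Int) ≤ 0 →
    (pvRun pvGA (mx, cur, bl, br) (List.replicate p (c, 1))).2.2 = (bl, br) := by
  intro p
  induction p with
  | zero => intros; rfl
  | succ p ih =>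
    intro mx cur bl br h1 h2
    cases p with
    | zero => rfl
    | succ q =>
      rw [List.replicate_succ,
        pvRun_cons' _ _ _ _ (by simp : List.replicate (q + 1) (c, (1:Int)) ≠ []),
        pv_stepA_plus, if_neg (by push_cast at h2; omega)]
      exact ih _ _ _ _ h1 (by push_cast at h2 ⊢; omega)

theorem pv_lastGroup (L : List (Int × Int)) (c mx cur bl br : Int)
    (h1 : cur ≤ mx) (h2 : (0:Int) ≤ mx)
    (h3 : cur + ((L.count (c, 1) : Int) - (L.count (c, -1) : Int)) = 0) :
    (pvRun pvGA (mx, cur, bl, br) (pvGrp L c)).2.2 = (bl, br) := by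
  unfold pvGrp
  cases hp : L.count (c, 1) with
  | zero =>
    rw [List.replicate_zero, List.append_nil]
    exact pv_minusOnly c _ _ _ _ _ h1
  | succ q =>
    rw [hp] at h3
    rw [List.replicate_succ, pv_minusRun c _ _ _ _ _ _ _ h1, ← List.replicate_succ]
    exact pv_plusOnly c (q + 1) _ _ _ _ h2 (by push_cast at h3 ⊢; omega)

theorem pv_groupStep (c mx cur bl br : Int) (m p : Nat) (y : Int × Int) (t : List (Int × Int))
    (h : cur ≤ mx) :
    pvRun pvGA (mx, cur, bl, br) ((List.replicate m (c, -1) ++ List.replicate p (c, 1)) ++ y :: t)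
      = pvRun pvGA (if cur + ((p : Int) - (m : Int)) > mx
                    then (cur + ((p : Int) - m), cur + ((p : Int) - m), c, y.1 - 1)
                    else (mx, cur + ((p : Int) - m), bl, br)) (y :: t) := by
  rw [List.append_assoc]
  cases p with
  | zero =>
    rw [List.replicate_zero, List.nil_append, pv_minusRun c m _ _ _ _ _ _ h,
      if_neg (by push_cast; omega)]
    have e0 : cur - (m : Int) = cur + (((0:Nat) : Int) - m) := by push_cast; ring
    rw [e0]
  | succ q =>
    rw [List.replicate_succ, List.cons_append, pv_minusRun c m _ _ _ _ _ _ h,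
      ← List.cons_append, ← List.replicate_succ,
      pv_plusRun c (q + 1) _ _ _ _ _ _ (by omega)]
    have e0 : cur - (m : Int) + ((q + 1 : Nat) : Int) = cur + (((q + 1 : Nat) : Int) - m) := by
      push_cast; ring
    rw [e0]

theorem pv_delta_counts (L : List (Int × Int)) (hpm : ∀ e ∈ L, e.2 = 1 ∨ e.2 = -1) (c : Int) :
    pvDelta L c = (L.count (c, 1) : Int) - (L.count (c, -1) : Int) := by
  induction L with
  | nil => simp [pvDelta]
  | cons e t ih =>
    have he := hpm e List.mem_cons_self
    have ih' := ih (fun x hx => hpm x (List.mem_cons_of_mem _ hx))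
    obtain ⟨a, b⟩ := e
    simp only at he
    have hstep : ∀ d : Int, pvDelta ((a, b) :: t) d = (if a = d then b else 0) + pvDelta t d := by
      intro d
      by_cases h : a = d
      · simp [pvDelta, List.filter_cons, h]
      · simp [pvDelta, List.filter_cons, h, show ((a, b).1 == d) = false by simp [h]]
    rw [hstep c, ih', List.count_cons, List.count_cons]
    by_cases h : a = c
    · subst h
      rcases he with rfl | rfl <;> simp <;> push_cast <;> ring
    · rcases he with rfl | rfl <;>
        simp [show ¬ ((c, (1:Int)) = (a, (1:Int))) from by
            intro he2; rw [Prod.mk.injEq] at he2; omega,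
          show ¬ ((c, (-1:Int)) = (a, (-1:Int))) from by
            intro he2; rw [Prod.mk.injEq] at he2; omega,
          show ¬ ((c, (1:Int)) = (a, (-1:Int))) from by
            intro he2; rw [Prod.mk.injEq] at he2; omega,
          show ¬ ((c, (-1:Int)) = (a, (1:Int))) from by
            intro he2; rw [Prod.mk.injEq] at he2; omega, h]

theorem pv_grp_head (L : List (Int × Int)) (c : Int)
    (h : (c, (1:Int)) ∈ L ∨ (c, (-1:Int)) ∈ L) :
    ∃ y t, pvGrp L c = y :: t ∧ y.1 = c := by
  unfold pvGrp
  cases hm : L.count (c, -1) with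
  | succ q => exact ⟨(c, -1), _, by rw [List.replicate_succ, List.cons_append], rfl⟩
  | zero =>
    cases hp : L.count (c, 1) with
    | succ q =>
      exact ⟨(c, 1), _, by rw [List.replicate_zero, List.nil_append, List.replicate_succ], rfl⟩
    | zero =>
      exfalso
      rcases h with h | h
      · have := List.count_pos_iff.mpr h; omega
      · have := List.count_pos_iff.mpr h; omega

theorem pv_sweep (L : List (Int × Int)) (hpm : ∀ e ∈ L, e.2 = 1 ∨ e.2 = -1) :
    ∀ (cs : List Int), (∀ c ∈ cs, (c, (1:Int)) ∈ L ∨ (c, (-1:Int)) ∈ L) →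
    ∀ mx cur bl br : Int, cur ≤ mx → 0 ≤ mx →
      cur + (cs.map (pvDelta L)).sum = 0 →
      (pvRun pvGA (mx, cur, bl, br) (pvE L cs)).2.2
        = (pvRun (pvGB (pvDelta L)) (mx, cur, bl, br) cs).2.2 := by
  intro cs
  induction cs with
  | nil => intros; rfl
  | cons c cs ih =>
    intro hcnt mx cur bl br h1 h2 h3
    have hδ := pv_delta_counts L hpm c
    rw [List.map_cons, List.sum_cons] at h3
    cases cs with
    | nil =>
      have hE : pvE L [c] = pvGrp L c := by simp [pvE]
      rw [hE, pvRun_single]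
      exact pv_lastGroup L c mx cur bl br h1 h2 (by rw [← hδ]; simpa using h3)
    | cons c' cs' =>
      obtain ⟨y, t, hgrp, hy1⟩ := pv_grp_head L c' (hcnt c' (by simp))
      have hE : pvE L (c :: c' :: cs')
          = (List.replicate (L.count (c, -1)) (c, -1) ++ List.replicate (L.count (c, 1)) (c, 1))
            ++ (y :: (t ++ pvE L cs')) := by
        show pvGrp L c ++ (pvGrp L c' ++ pvE L cs') = _
        rw [hgrp, pvGrp, List.cons_append]
      rw [hE, pv_groupStep c mx cur bl br _ _ _ _ h1]
      have hyt : y :: (t ++ pvE L cs') = pvE L (c' :: cs') := by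
        show _ = pvGrp L c' ++ pvE L cs'
        rw [hgrp, List.cons_append]
      rw [hyt, hy1]
      rw [show pvRun (pvGB (pvDelta L)) (mx, cur, bl, br) (c :: c' :: cs')
            = pvRun (pvGB (pvDelta L)) (pvGB (pvDelta L) (mx, cur, bl, br) c c') (c' :: cs')
          from rfl]
      have hgb : pvGB (pvDelta L) (mx, cur, bl, br) c c'
          = if cur + ((L.count (c, 1) : Int) - (L.count (c, -1) : Int)) > mx
            then (cur + ((L.count (c, 1) : Int) - L.count (c, -1)),
                  cur + ((L.count (c, 1) : Int) - L.count (c, -1)), c, c' - 1)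
            else (mx, cur + ((L.count (c, 1) : Int) - L.count (c, -1)), bl, br) := by
        simp only [pvGB, hδ]
      rw [hgb]
      have hcnt' : ∀ d ∈ c' :: cs', (d, (1:Int)) ∈ L ∨ (d, (-1:Int)) ∈ L :=
        fun d hd => hcnt d (List.mem_cons_of_mem _ hd)
      by_cases hcond : cur + ((L.count (c, 1) : Int) - (L.count (c, -1) : Int)) > mx
      · rw [if_pos hcond]
        exact ih hcnt' _ _ _ _ (le_refl _) (by omega) (by rw [hδ] at h3; omega)
      · rw [if_neg hcond]
        exact ih hcnt' _ _ _ _ (by omega) h2 (by rw [hδ] at h3; omega)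

-- ---- sums ----
theorem pv_sum_zero (v : Int) (x : Int) : ∀ t : List Int, x ∉ t →
    (t.map (fun c => if x = c then v else 0)).sum = 0 := by
  intro t
  induction t with
  | nil => intro _; rfl
  | cons c t ih =>
    intro h
    rw [List.mem_cons, not_or] at h
    simp [h.1, ih h.2]

theorem pv_sum_single (v : Int) (x : Int) : ∀ cs : List Int, cs.Nodup → x ∈ cs →
    (cs.map (fun c => if x = c then v else 0)).sum = v := by
  intro cs
  induction cs with
  | nil => intro _ h; simp at h
  | cons c t ih =>
    intro hnd hm
    rw [List.nodup_cons] at hnd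
    rcases List.mem_cons.mp hm with rfl | hm
    · simp [pv_sum_zero v x t hnd.1]
    · have : x ≠ c := fun h => hnd.1 (h ▸ hm)
      simp [this, ih hnd.2 hm]

theorem pv_sum_deltas : ∀ (L : List (Int × Int)) (cs : List Int), cs.Nodup →
    (∀ e ∈ L, e.1 ∈ cs) →
    (cs.map (pvDelta L)).sum = (L.map (fun e => e.2)).sum := by
  intro L
  induction L with
  | nil =>
    intro cs _ _
    have h0 : pvDelta ([] : List (Int × Int)) = fun _ => (0:Int) := funext fun _ => rfl
    rw [h0]
    simp
  | cons e t ih =>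
    intro cs hnd hcov
    have h1 : pvDelta (e :: t) = fun c => (if e.1 = c then e.2 else 0) + pvDelta t c := by
      funext c
      by_cases h : e.1 = c
      · simp [pvDelta, List.filter_cons, h]
      · have h2 : (e.1 == c) = false := by simp [h]
        simp [pvDelta, List.filter_cons, h, h2]
    rw [h1, PySem.List.sum_map_add_int,
      ih cs hnd (fun x hx => hcov x (List.mem_cons_of_mem _ hx)),
      pv_sum_single e.2 e.1 cs hnd (hcov e List.mem_cons_self)]
    simp

theorem pv_total : ∀ segs : List (Int × Int), ((pvEv segs).map (fun e => e.2)).sum = 0 := by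
  intro segs
  induction segs with
  | nil => rfl
  | cons p t ih => simp [pvEv] at ih ⊢; omega

theorem pv_events (segs : List (Int × Int)) : ∀ acc : List (Int × Int),
    segs.foldl (fun acc p => acc ++ [(p.1, (1:Int))] ++ [(p.2 + 1, (-1:Int))]) acc
      = acc ++ pvEv segs := by
  induction segs with
  | nil => intro acc; simp [pvEv]
  | cons p t ih => intro acc; rw [List.foldl_cons, ih]; simp [pvEv]

theorem pv_hpm (segs : List (Int × Int)) : ∀ e ∈ pvEv segs, e.2 = 1 ∨ e.2 = -1 := by
  intro e he
  simp only [pvEv, List.mem_flatMap, List.mem_cons, List.not_mem_nil, or_false] at he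
  obtain ⟨p, -, hp⟩ := he
  rcases hp with rfl | rfl
  · left; rfl
  · right; rfl

-- ---- B side: the stabbing count is the prefix sum of deltas ----
theorem pvS_cons (e : Int × Int) (t : List (Int × Int)) (c : Int) :
    pvS (e :: t) c = (if e.1 ≤ c then e.2 else 0) + pvS t c := by
  by_cases h : e.1 ≤ c <;> simp [pvS, List.filter_cons, h]

theorem pvDelta_cons (e : Int × Int) (t : List (Int × Int)) (c : Int) :
    pvDelta (e :: t) c = (if e.1 = c then e.2 else 0) + pvDelta t c := by
  by_cases h : e.1 = c
  · simp [pvDelta, List.filter_cons, h]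
  · simp [pvDelta, List.filter_cons, h, show (e.1 == c) = false by simp [h]]

-- B's direct scan over the segments computes the prefix sum of the event weights
theorem pv_cov_eq_S (segments : List (Int × Int)) (c : Int) :
    ((segments.countP (fun p => decide (p.1 ≤ c)) : Int))
      - ((segments.countP (fun p => decide (p.2 < c)) : Int))
    = pvS (pvEv segments) c := by
  induction segments with
  | nil => simp [pvS, pvEv]
  | cons p t ih =>
    have hE : pvEv (p :: t) = (p.1, (1:Int)) :: (p.2 + 1, (-1:Int)) :: pvEv t := by simp [pvEv]
    rw [hE, pvS_cons, pvS_cons, ← ih]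
    simp only [List.countP_cons]
    by_cases h1 : p.1 ≤ c <;> by_cases h2 : p.2 < c <;>
      simp [h1, h2, show p.2 + 1 ≤ c ↔ p.2 < c from by omega] <;> push_cast <;> ring

theorem pv_S_first (L : List (Int × Int)) (c : Int) (h : ∀ e ∈ L, e.1 ≤ c → e.1 = c) :
    pvS L c = pvDelta L c := by
  induction L with
  | nil => rfl
  | cons e t ih =>
    rw [pvS_cons, pvDelta_cons, ih (fun x hx => h x (List.mem_cons_of_mem _ hx))]
    have he := h e List.mem_cons_self
    by_cases h1 : e.1 ≤ c
    · rw [if_pos h1, if_pos (he h1)]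
    · rw [if_neg h1, if_neg (fun hq => h1 (le_of_eq hq))]

theorem pv_S_gap (L : List (Int × Int)) (c c' : Int) (hcc : c < c')
    (h : ∀ e ∈ L, c < e.1 → e.1 ≤ c' → e.1 = c') :
    pvS L c' = pvS L c + pvDelta L c' := by
  induction L with
  | nil => simp [pvS, pvDelta]
  | cons e t ih =>
    rw [pvS_cons, pvS_cons, pvDelta_cons, ih (fun x hx => h x (List.mem_cons_of_mem _ hx))]
    have he := h e List.mem_cons_self
    by_cases h1 : e.1 ≤ c
    · rw [if_pos h1, if_pos (by omega), if_neg (by omega)]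
      ring
    · by_cases h2 : e.1 ≤ c'
      · have := he (by omega) h2
        rw [if_pos h2, if_neg h1, if_pos this]
        ring
      · rw [if_neg h2, if_neg h1, if_neg (by omega)]
        ring

-- the running-counter run and B's recompute-from-scratch run agree
theorem pv_bridge (L : List (Int × Int)) : ∀ (cs : List Int) (mx cur bl br : Int),
    cs.Pairwise (· < ·) →
    (∀ c rest, cs = c :: rest →
      cur + pvDelta L c = pvS L c ∧ ∀ e ∈ L, c < e.1 → e.1 ∈ rest) →
    (pvRun (pvGB (pvDelta L)) (mx, cur, bl, br) cs).2.2
      = (pvRun (pvHB L) (mx, bl, br) cs).2 := by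
  intro cs
  induction cs with
  | nil => intros; rfl
  | cons c rest ih =>
    intro mx cur bl br hpw hh
    obtain ⟨hhead, hcov⟩ := hh c rest rfl
    cases rest with
    | nil => rw [pvRun_single, pvRun_single]
    | cons c' t =>
      rw [List.pairwise_cons] at hpw
      have hcc : c < c' := hpw.1 c' (by simp)
      have hpw' := hpw.2
      have hgb : pvGB (pvDelta L) (mx, cur, bl, br) c c'
          = if pvS L c > mx then (pvS L c, pvS L c, c, c' - 1) else (mx, pvS L c, bl, br) := by
        simp only [pvGB, hhead]
      have hgap : pvS L c + pvDelta L c' = pvS L c' := by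
        rw [pv_S_gap L c c' hcc]
        intro e he h1 h2
        rcases List.mem_cons.mp (hcov e he h1) with h3 | h3
        · exact h3
        · exfalso
          rw [List.pairwise_cons] at hpw'
          have := hpw'.1 e.1 h3
          omega
      have hcov' : ∀ e ∈ L, c' < e.1 → e.1 ∈ t := by
        intro e he h1
        rcases List.mem_cons.mp (hcov e he (by omega)) with h3 | h3
        · omega
        · exact h3
      have hnext : ∀ (d : Int) (r : List Int), c' :: t = d :: r →
          pvS L c + pvDelta L d = pvS L d ∧ ∀ e ∈ L, d < e.1 → e.1 ∈ r := by
        intro d r hdr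
        obtain ⟨rfl, rfl⟩ : c' = d ∧ t = r := by
          rw [List.cons.injEq] at hdr; exact hdr
        exact ⟨hgap, hcov'⟩
      rw [pvRun_cons, pvRun_cons, hgb,
        show pvHB L (mx, bl, br) c c'
          = if pvS L c > mx then (pvS L c, c, c' - 1) else (mx, bl, br) from rfl]
      by_cases hcond : pvS L c > mx
      · rw [if_pos hcond, if_pos hcond]
        exact ih _ _ _ _ hpw' hnext
      · rw [if_neg hcond, if_neg hcond]
        exact ih _ _ _ _ hpw' hnext

-- B's boundary set is the set of event coordinates
theorem pv_pts_eq (segments : List (Int × Int)) :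
    PySem.List.sorted
      (PySem.Set.union (PySem.Set.ofList (segments.map (fun p => p.1)))
        (segments.map (fun p => p.2 + 1))) (fun c => c) false
    = PySem.List.sorted (PySem.Set.ofList ((pvEv segments).map (fun e => e.1)))
        (fun c => c) false := by
  apply PySem.List.sorted_eq_sorted_of_perm _ _ _ (fun a b h => h)
  apply (List.perm_ext_iff_of_nodup
    (PySem.Set.nodup_union _ _ (PySem.Set.nodup_ofList _)) (PySem.Set.nodup_ofList _)).mpr
  intro x
  rw [PySem.Set.mem_union, PySem.Set.mem_ofList, PySem.Set.mem_ofList]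
  simp only [pvEv, List.mem_map, List.mem_flatMap, List.mem_cons, List.not_mem_nil, or_false]
  constructor
  · rintro (⟨p, hp, rfl⟩ | ⟨p, hp, rfl⟩)
    · exact ⟨(p.1, 1), ⟨p, hp, Or.inl rfl⟩, rfl⟩
    · exact ⟨(p.2 + 1, -1), ⟨p, hp, Or.inr rfl⟩, rfl⟩
  · rintro ⟨e, ⟨p, hp, (rfl | rfl)⟩, rfl⟩
    · exact Or.inl ⟨p, hp, rfl⟩
    · exact Or.inr ⟨p, hp, rfl⟩

-- ---- loop bridges (exact shape of the ports' folds) ----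
theorem pv_loopA (xs : List (Int × Int)) :
    (PySem.List.pyRange 0 ((xs.length : Int) - 1) 1).foldl
      (fun (st : Int × Int × Int × Int) i =>
        let cur := st.2.1 + (PySem.List.pyGetD xs i ((0:Int),(0:Int))).2
        if cur > st.1 then
          (cur, cur, (PySem.List.pyGetD xs i ((0:Int),(0:Int))).1,
           (PySem.List.pyGetD xs (i+1) ((0:Int),(0:Int))).1 - 1)
        else (st.1, cur, st.2.2.1, st.2.2.2))
      ((0:Int), (0:Int), (0:Int), (0:Int))
    = pvRun pvGA ((0:Int), (0:Int), (0:Int), (0:Int)) xs :=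
  pv_adj xs ((0:Int),(0:Int)) pvGA _

def pvGBcov (segments : List (Int × Int)) (st : Int × Int × Int) (c c' : Int) : Int × Int × Int :=
  let k := ((segments.countP (fun p => decide (p.1 ≤ c)) : Int))
    - ((segments.countP (fun p => decide (p.2 < c)) : Int))
  if k > st.1 then (k, c, c' - 1) else st

theorem pvGBcov_eq_pvHB (segments : List (Int × Int)) :
    pvGBcov segments = pvHB (pvEv segments) := by
  funext st c c'
  simp only [pvGBcov, pvHB, pv_cov_eq_S]

theorem pv_loopB (segments : List (Int × Int)) (xs : List Int) :
    (PySem.List.pyRange 0 ((xs.length : Int) - 1) 1).foldl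
      (fun (st : Int × Int × Int) j =>
        let k := ((segments.countP (fun p => decide (p.1 ≤ PySem.List.pyGetD xs j 0)) : Int))
          - ((segments.countP (fun p => decide (p.2 < PySem.List.pyGetD xs j 0)) : Int))
        if k > st.1 then (k, PySem.List.pyGetD xs j 0, PySem.List.pyGetD xs (j+1) 0 - 1)
        else st)
      ((0:Int), (0:Int), (0:Int))
    = pvRun (pvHB (pvEv segments)) ((0:Int), (0:Int), (0:Int)) xs := by
  rw [← pvGBcov_eq_pvHB]
  exact pv_adj xs 0 (pvGBcov segments) _

theorem pv_main (n : Int) (segments : List (Int × Int)) :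
    max_intersecting_segment n segments = max_intersecting_segment_alt n segments := by
  simp only [max_intersecting_segment, max_intersecting_segment_alt]
  rw [pv_events segments [], List.nil_append, pv_pts_eq segments]
  set L := pvEv segments with hL
  set cs := PySem.List.sorted (PySem.Set.ofList (L.map (fun e => e.1))) (fun c => c) false with hcs
  have hpw : cs.Pairwise (· < ·) := PySem.List.sorted_ofList_pairwise_lt _
  have hnd : cs.Nodup := hpw.imp (fun h => ne_of_lt h)
  have hcov : ∀ e ∈ L, e.1 ∈ cs := by
    intro e he
    rw [hcs, PySem.List.mem_sorted, PySem.Set.mem_ofList, List.mem_map]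
    exact ⟨e, he, rfl⟩
  have hpm : ∀ e ∈ L, e.2 = 1 ∨ e.2 = -1 := pv_hpm segments
  rw [pv_sorted2_eq L (pvE L cs) (pv_perm_E L cs hnd hcov hpm) (pv_pairwise_E L cs hpw)]
  rw [pv_loopA, pv_loopB segments cs]
  have hcnt : ∀ c ∈ cs, (c, (1:Int)) ∈ L ∨ (c, (-1:Int)) ∈ L := by
    intro c hc
    rw [hcs, PySem.List.mem_sorted, PySem.Set.mem_ofList, List.mem_map] at hc
    obtain ⟨e, he, he1⟩ := hc
    rcases hpm e he with h2 | h2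
    · left; rw [← he1, ← h2]; exact he
    · right; rw [← he1, ← h2]; exact he
  have hsum : (0:Int) + (cs.map (pvDelta L)).sum = 0 := by
    rw [pv_sum_deltas L cs hnd hcov, hL, pv_total segments]
    norm_num
  have hA := pv_sweep L hpm cs hcnt 0 0 0 0 (le_refl _) (le_refl _) hsum
  have hB : (pvRun (pvGB (pvDelta L)) ((0:Int), (0:Int), (0:Int), (0:Int)) cs).2.2
      = (pvRun (pvHB L) ((0:Int), (0:Int), (0:Int)) cs).2 := by
    apply pv_bridge L cs 0 0 0 0 hpw
    intro c rest hcr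
    have hc : c ∈ cs := by rw [hcr]; exact List.mem_cons_self
    have hmin : ∀ x ∈ cs, c = x ∨ c < x := by
      intro x hx
      rw [hcr] at hx
      rcases List.mem_cons.mp hx with rfl | hx
      · exact Or.inl rfl
      · rw [hcr, List.pairwise_cons] at hpw
        exact Or.inr (hpw.1 x hx)
    constructor
    · rw [zero_add]
      symm
      apply pv_S_first
      intro e he h1
      rcases hmin e.1 (hcov e he) with h2 | h2
      · omega
      · omega
    · intro e he h1
      rcases List.mem_cons.mp (hcr ▸ hcov e he) with h2 | h2
      · omega
      · exact h2
  rw [hA, hB]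

-- ===== VERDICT (by name: the statement is the Claim_ definition above) =====
theorem max_intersecting_segment_spec : Claim_equal_max_intersecting_segment := by
  intro n segments _
  unfold Spec_max_intersecting_segment
  exact pv_main n segments
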